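-- pv_equiv track=rewrite | github.com/ak-run/advent-of-code-2023 | Day7-Camel-Cards/solution_day7_part2.py | categorise_and_sort
-- ===== SOURCE A (Python) =====
-- def hand_sort(hand):
--     card_order = "AKQT98765432J"
--     return [card_order.index(card) for card in hand[0]]
--
-- def categorise_and_sort(data):
--     categorised_hands = {
--         "Five of a kind": [],
--         "Four of a kind": [],
--         "Full house": [],
--         "Three of a kind": [],
--         "Two pair": [],
--         "One pair": [],
--         "High card": []
--     }
--
--     for hand in data:
--         # Determine hand category based on character counts
--         # Accounted for "J" in each hand
--         category = None
--         char_counts = {card: hand[0].count(card) for card in set(hand[0])}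
--
--         if 5 in char_counts.values():
--             category = "Five of a kind"
--         elif 4 in char_counts.values():
--             if "J" in char_counts:
--                 category = "Five of a kind"
--             else:
--                 category = "Four of a kind"
--         elif 3 in char_counts.values() and 2 in char_counts.values():
--             if "J" in char_counts:
--                 category = "Five of a kind"
--             else:
--                 category = "Full house"
--         elif 3 in char_counts.values():
--             if 'J' in char_counts:
--                 category = "Four of a kind"
--             else:
--                 category = 'Three of a kind'
--         elif list(char_counts.values()).count(2) == 2:
--             if "J" in char_counts and char_counts["J"] == 1:
--                 category = "Full house"
--             elif "J" in char_counts and char_counts["J"] == 2: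
--                 category = "Four of a kind"
--             else:
--                 category = "Two pair"
--         elif 2 in char_counts.values():
--             if "J" in char_counts:
--                 category = "Three of a kind"
--             else:
--                 category = "One pair"
--         else:
--             if "J" in char_counts:
--                 category = "One pair"
--             else:
--                 category = "High card"
--
--         # Append the hand to the categorised hands
--         categorised_hands[category].append(hand)
--
--     # Sort each list based on the sorting function
--     for category, hands in categorised_hands.items():
--         categorised_hands[category] = sorted(hands, key=hand_sort)
--
--     return categorised_hands
-- ===== SOURCE B (Python) =====
-- CATEGORIES = ["Five of a kind", "Four of a kind", "Full house",
--               "Three of a kind", "Two pair", "One pair", "High card"]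
--
--
-- def hand_sort(hand):
--     card_order = "AKQT98765432J"
--     return [card_order.index(card) for card in hand[0]]
--
--
-- def classify(hand):
--     counts = {}
--     for card in hand[0]:
--         counts[card] = counts.get(card, 0) + 1
--     vals = list(counts.values())
--     jokers = counts.get("J", 0)
--     if 5 in vals:
--         return "Five of a kind"
--     if 4 in vals:
--         return "Five of a kind" if jokers else "Four of a kind"
--     if 3 in vals and 2 in vals:
--         return "Five of a kind" if jokers else "Full house"
--     if 3 in vals:
--         return "Four of a kind" if jokers else "Three of a kind"
--     if vals.count(2) == 2:
--         if jokers == 1: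
--             return "Full house"
--         if jokers == 2:
--             return "Four of a kind"
--         return "Two pair"
--     if 2 in vals:
--         return "Three of a kind" if jokers else "One pair"
--     return "One pair" if jokers else "High card"
--
--
-- def categorise_and_sort(data):
--     # sort the whole input once by hand strength, then distribute into buckets
--     ordered = sorted(data, key=hand_sort)
--     return {c: [h for h in ordered if classify(h) == c] for c in CATEGORIES}
-- ===== Notes on version B (the rewrite author's own statement) =====
-- stated objective: alternative
-- what changed: B sorts the whole input once by the hand_sort key and then partitions the already-ordered list into the seven category buckets (classification via a single counting loop), instead of A's distribute-into-buckets-first and then sorting each bucket separately; equivalence rests on stable sorting commuting with filtering.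
import Mathlib
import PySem

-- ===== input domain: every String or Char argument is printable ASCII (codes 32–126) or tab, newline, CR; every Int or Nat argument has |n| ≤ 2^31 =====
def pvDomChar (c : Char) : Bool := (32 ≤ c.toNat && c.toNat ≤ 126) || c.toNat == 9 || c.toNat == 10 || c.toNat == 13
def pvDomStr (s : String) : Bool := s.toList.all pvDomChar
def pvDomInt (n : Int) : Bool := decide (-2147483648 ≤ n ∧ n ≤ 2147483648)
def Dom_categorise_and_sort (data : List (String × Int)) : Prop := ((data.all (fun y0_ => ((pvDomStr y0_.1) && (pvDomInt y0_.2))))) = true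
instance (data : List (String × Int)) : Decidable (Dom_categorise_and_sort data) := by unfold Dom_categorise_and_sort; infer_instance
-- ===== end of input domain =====

-- B replaces A's distribute-into-buckets-then-sort-each-bucket by one global stable sort followed by
-- a partition of the ordered list into the seven buckets (classification by a single counting loop);
-- equivalence is proved for hands made of the 13 camel cards (elsewhere both Pythons raise ValueError).

-- ===== PORT A =====
-- card_order = "AKQT98765432J" (the literal both Pythons use)
def pvCardOrder : List Char := "AKQT98765432J".toList

-- hand_sort: card_order.index(card) raises ValueError on a foreign card — Pre_ excludes those
-- inputs; under Pre_ the card is present and '(index? …).getD 0' is exactly str.index.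
def hand_sort (hand : String × Int) : List Int :=
  hand.1.toList.map (fun card => (((PySem.List.index? pvCardOrder card).getD 0 : Nat) : Int))

-- the body of A's loop: char_counts = {card: hand[0].count(card) for card in set(hand[0])}
-- (hand[0].count of a single character is exactly List.count on the characters), then the
-- if/elif chain; 'char_counts["J"]' is only evaluated under the '"J" in char_counts' guard,
-- where '.getD _ 0' is exactly the Python lookup.
def pvCategoryA (hand : String × Int) : String :=
  let chars := hand.1.toList
  let charCounts : PySem.Dict Char Int :=
    (PySem.Set.ofList chars).foldl
      (fun d card => d.insert card ((List.count card chars : Nat) : Int)) PySem.Dict.empty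
  let vals := charCounts.values
  if (5 : Int) ∈ vals then "Five of a kind"
  else if (4 : Int) ∈ vals then
    if charCounts.contains 'J' then "Five of a kind" else "Four of a kind"
  else if (3 : Int) ∈ vals ∧ (2 : Int) ∈ vals then
    if charCounts.contains 'J' then "Five of a kind" else "Full house"
  else if (3 : Int) ∈ vals then
    if charCounts.contains 'J' then "Four of a kind" else "Three of a kind"
  else if List.count (2 : Int) vals = 2 then
    if charCounts.contains 'J' ∧ charCounts.getD 'J' 0 = 1 then "Full house"
    else if charCounts.contains 'J' ∧ charCounts.getD 'J' 0 = 2 then "Four of a kind"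
    else "Two pair"
  else if (2 : Int) ∈ vals then
    if charCounts.contains 'J' then "Three of a kind" else "One pair"
  else
    if charCounts.contains 'J' then "One pair" else "High card"

-- 'categorised_hands[category].append(hand)' is a lookup (the key is always present) plus an
-- in-place append: exactly Dict.modify with default []; the final loop reassigns each key of the
-- items snapshot with the sorted bucket (insert overwrites in place).
def categorise_and_sort (data : List (String × Int)) : List (String × List (String × Int)) :=
  let d0 : PySem.Dict String (List (String × Int)) :=
    PySem.Dict.mk [("Five of a kind", []), ("Four of a kind", []), ("Full house", []),
                   ("Three of a kind", []), ("Two pair", []), ("One pair", []), ("High card", [])]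
  let d1 := data.foldl (fun d hand => d.modify (pvCategoryA hand) [] (fun hs => hs ++ [hand])) d0
  let d2 := d1.items.foldl (fun d p => d.insert p.1 (PySem.List.sorted p.2 hand_sort)) d1
  d2.items

-- ===== PORT B =====
-- (Source B re-defines hand_sort verbatim; the single Lean definition above serves both ports)
def pvCategories : List String :=
  ["Five of a kind", "Four of a kind", "Full house", "Three of a kind",
   "Two pair", "One pair", "High card"]

-- classify: one counting loop 'counts[card] = counts.get(card, 0) + 1', then the chain
def pvClassify (hand : String × Int) : String :=
  let counts : PySem.Dict Char Int :=
    hand.1.toList.foldl (fun d card => d.insert card (d.getD card 0 + 1)) PySem.Dict.empty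
  let vals := counts.values
  let jokers := counts.getD 'J' 0
  if (5 : Int) ∈ vals then "Five of a kind"
  else if (4 : Int) ∈ vals then
    if jokers ≠ 0 then "Five of a kind" else "Four of a kind"
  else if (3 : Int) ∈ vals ∧ (2 : Int) ∈ vals then
    if jokers ≠ 0 then "Five of a kind" else "Full house"
  else if (3 : Int) ∈ vals then
    if jokers ≠ 0 then "Four of a kind" else "Three of a kind"
  else if List.count (2 : Int) vals = 2 then
    if jokers = 1 then "Full house"
    else if jokers = 2 then "Four of a kind"
    else "Two pair"
  else if (2 : Int) ∈ vals then
    if jokers ≠ 0 then "Three of a kind" else "One pair"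
  else
    if jokers ≠ 0 then "One pair" else "High card"

def categorise_and_sort_alt (data : List (String × Int)) : List (String × List (String × Int)) :=
  let ordered := PySem.List.sorted data hand_sort
  pvCategories.map (fun c => (c, ordered.filter (fun h => pvClassify h == c)))

-- ===== PRECONDITION & SPEC =====
-- Pre_ excludes exactly the inputs where some hand contains a character outside
-- "AKQT98765432J": there card_order.index raises ValueError (in both A and B).
def Pre_categorise_and_sort (data : List (String × Int)) : Prop :=
  (data.all (fun p => p.1.toList.all (fun c => pvCardOrder.contains c))) = true
instance (data : List (String × Int)) : Decidable (Pre_categorise_and_sort data) := by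
  unfold Pre_categorise_and_sort; infer_instance

def pvWitness_categorise_and_sort : (List (String × Int)) :=
  [("32T3K", 765), ("T55J5", 684)]

def Spec_categorise_and_sort (data : List (String × Int)) (out : List (String × List (String × Int))) : Prop := out = categorise_and_sort_alt data
instance (data : List (String × Int)) (out : List (String × List (String × Int))) : Decidable (Spec_categorise_and_sort data out) := by unfold Spec_categorise_and_sort; infer_instance

-- ===== CLAIM (what is proved, stated in full; the proofs are below) =====
def Claim_equal_categorise_and_sort : Prop := ∀ (data : List (String × Int)), Dom_categorise_and_sort data → Pre_categorise_and_sort data → Spec_categorise_and_sort data (categorise_and_sort data)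

-- ===== LEMMAS AND PROOFS =====

-- The two character-count dicts are the same dict (A's set/dict comprehension, B's counting loop).
theorem pv_countsA_eq_counter (chars : List Char) :
    (PySem.Set.ofList chars).foldl
      (fun d card => d.insert card ((List.count card chars : Nat) : Int)) PySem.Dict.empty
    = PySem.Dict.counter chars := by
  apply PySem.Dict.ext
  rw [PySem.Dict.items_counter]
  have h := PySem.Dict.items_foldl_insert_fresh (PySem.Set.ofList chars) (fun card => card)
        (fun card => ((List.count card chars : Nat) : Int)) PySem.Dict.empty
        (by intro a _; rfl) (by simp [PySem.Set.nodup_ofList])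
  simpa using h

-- per-hand agreement of the two classifications
theorem pv_classify_eq (hand : String × Int) : pvClassify hand = pvCategoryA hand := by
  unfold pvClassify pvCategoryA
  simp only []
  rw [pv_countsA_eq_counter, PySem.Dict.foldl_insert_getD_add_one_eq_counter]
  by_cases hJ : 'J' ∈ hand.1.toList
  · simp only [PySem.Dict.contains_counter, PySem.Dict.getD_counter]
    have hcnt : List.count 'J' hand.1.toList ≠ 0 := (List.count_pos_iff.mpr hJ).ne'
    simp [hJ, hcnt]
  · simp only [PySem.Dict.contains_counter, PySem.Dict.getD_counter]
    have hcnt : List.count 'J' hand.1.toList = 0 := List.count_eq_zero.mpr hJ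
    simp [hJ, hcnt]

-- Set.update is the identity when every element is already present
theorem pv_update_self {α : Type} [BEq α] [LawfulBEq α] (s : PySem.Set α) (l : List α)
    (h : ∀ x ∈ l, x ∈ s) : PySem.Set.update s l = s := by
  induction l generalizing s with
  | nil => rfl
  | cons x t ih =>
    have hx : PySem.Set.add s x = s := by
      have hmem : x ∈ s := h x (by simp)
      simp [PySem.Set.add, hmem]
    calc PySem.Set.update s (x :: t) = PySem.Set.update (PySem.Set.add s x) t := rfl
      _ = PySem.Set.update s t := by rw [hx]
      _ = s := ih s (fun y hy => h y (by simp [hy]))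

-- every category A produces is one of the seven bucket names
theorem pv_catA_mem (hand : String × Int) : pvCategoryA hand ∈ pvCategories := by
  unfold pvCategoryA pvCategories
  simp only []
  split_ifs <;> simp

-- lookups through a fold of inserts over distinct keys
theorem pv_get?_foldl_insert {ν : Type} (ks : List String) (v : String → ν)
    (d : PySem.Dict String ν) (c : String) (hnd : ks.Nodup) (hc : c ∈ ks) :
    (ks.foldl (fun d k => d.insert k (v k)) d).get? c = some (v c) := by
  induction ks generalizing d with
  | nil => cases hc
  | cons k t ih =>
    simp only [List.foldl_cons]
    rcases List.mem_cons.mp hc with rfl | hct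
    · have hnt : c ∉ t := (List.nodup_cons.mp hnd).1
      -- value inserted at c survives the rest of the fold
      have : ∀ (l : List String) (d' : PySem.Dict String ν), c ∉ l →
          (l.foldl (fun d k => d.insert k (v k)) d').get? c = d'.get? c := by
        intro l
        induction l with
        | nil => intro d' _; rfl
        | cons a u ihu =>
          intro d' hcl
          simp only [List.foldl_cons]
          rw [ihu _ (by simp at hcl; exact hcl.2)]
          exact PySem.Dict.get?_insert_of_ne d' _ (by simp at hcl; exact hcl.1)
      rw [this t _ hnt, PySem.Dict.get?_insert_self]
    · exact ih _ ((List.nodup_cons.mp hnd).2) hct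

-- ------- stable insertion sort commutes with filtering -------

theorem pv_insertBy_nil {α : Type} (lt : α → α → Bool) (x : α) :
    PySem.List.insertBy lt x [] = [x] := rfl

theorem pv_insertBy_cons {α : Type} (lt : α → α → Bool) (x y : α) (t : List α) :
    PySem.List.insertBy lt x (y :: t)
    = if lt x y = true then x :: y :: t else y :: PySem.List.insertBy lt x t := rfl

theorem pv_filter_insertBy_false {α : Type} (lt : α → α → Bool) (p : α → Bool) (x : α)
    (hx : p x = false) (ys : List α) :
    (PySem.List.insertBy lt x ys).filter p = ys.filter p := by
  induction ys with
  | nil => simp [pv_insertBy_nil, hx]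
  | cons y t ih =>
    rw [pv_insertBy_cons]
    by_cases h : lt x y = true
    · simp [h, List.filter_cons, hx]
    · rw [if_neg h]
      simp only [List.filter_cons]
      rw [ih]

theorem pv_insertBy_front {α : Type} (lt : α → α → Bool) (x : α) (l : List α)
    (h : ∀ z ∈ l, lt x z = true) : PySem.List.insertBy lt x l = x :: l := by
  cases l with
  | nil => rfl
  | cons y t => rw [pv_insertBy_cons, if_pos (h y (by simp))]

theorem pv_filter_insertBy_true {α : Type} (lt : α → α → Bool) (p : α → Bool) (x : α)
    (hx : p x = true)
    (hstep : ∀ y z, lt x y = true → lt z y = false → lt x z = true)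
    (ys : List α) (hpw : ys.Pairwise (fun a b => lt b a = false)) :
    (PySem.List.insertBy lt x ys).filter p = PySem.List.insertBy lt x (ys.filter p) := by
  induction ys with
  | nil => simp [pv_insertBy_nil, hx]
  | cons y t ih =>
    have hy : ∀ z ∈ t, lt z y = false := fun z hz => (List.pairwise_cons.mp hpw).1 z hz
    have hpt : t.Pairwise (fun a b => lt b a = false) := (List.pairwise_cons.mp hpw).2
    rw [pv_insertBy_cons]
    by_cases h : lt x y = true
    · -- x goes in front; in the filtered list x still goes in front
      rw [if_pos h, List.filter_cons_of_pos hx]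
      rw [pv_insertBy_front]
      intro z hz
      rcases List.mem_cons.mp (List.mem_of_mem_filter hz) with rfl | hzt
      · exact h
      · exact hstep y z h (hy z hzt)
    · rw [if_neg h]
      by_cases hpy : p y = true
      · rw [List.filter_cons_of_pos hpy, List.filter_cons_of_pos hpy, pv_insertBy_cons, if_neg h]
        rw [ih hpt]
      · rw [List.filter_cons_of_neg (by simp [hpy]), List.filter_cons_of_neg (by simp [hpy])]
        exact ih hpt

theorem pv_pairwise_insertBy {α : Type} (lt : α → α → Bool) (x : α)
    (hasym : ∀ a b, lt a b = true → lt b a = false)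
    (htr : ∀ a b c, lt a b = true → lt c b = false → lt c a = false)
    (ys : List α) (hpw : ys.Pairwise (fun a b => lt b a = false)) :
    (PySem.List.insertBy lt x ys).Pairwise (fun a b => lt b a = false) := by
  induction ys with
  | nil => simp [pv_insertBy_nil]
  | cons y t ih =>
    have hy : ∀ z ∈ t, lt z y = false := fun z hz => (List.pairwise_cons.mp hpw).1 z hz
    have hpt : t.Pairwise (fun a b => lt b a = false) := (List.pairwise_cons.mp hpw).2
    rw [pv_insertBy_cons]
    by_cases h : lt x y = true
    · rw [if_pos h]
      refine List.pairwise_cons.mpr ⟨?_, hpw⟩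
      intro z hz
      rcases List.mem_cons.mp hz with rfl | hzt
      · exact hasym x z h
      · exact htr x y z h (hy z hzt)
    · rw [if_neg h]
      refine List.pairwise_cons.mpr ⟨?_, ih hpt⟩
      intro z hz
      rcases (PySem.List.mem_insertBy lt x z t).mp hz with rfl | hzt
      · simpa using h
      · exact hy z hzt

-- order facts for the hand_sort key (lists of Ints, lexicographic)
theorem pv_hasym (a b : String × Int) (h : decide (hand_sort a < hand_sort b) = true) :
    decide (hand_sort b < hand_sort a) = false := by
  simp only [decide_eq_true_eq] at h
  simpa using lt_asymm h

theorem pv_htr (a b c : String × Int) (h1 : decide (hand_sort a < hand_sort b) = true)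
    (h2 : decide (hand_sort c < hand_sort b) = false) :
    decide (hand_sort c < hand_sort a) = false := by
  simp only [decide_eq_true_eq] at h1
  simp only [decide_eq_false_iff_not] at h2 ⊢
  exact fun hca => h2 (lt_trans hca h1)

theorem pv_hstep (y z : String × Int) {x : String × Int}
    (h1 : decide (hand_sort x < hand_sort y) = true)
    (h2 : decide (hand_sort z < hand_sort y) = false) :
    decide (hand_sort x < hand_sort z) = true := by
  simp only [decide_eq_true_eq] at h1 ⊢
  simp only [decide_eq_false_iff_not] at h2
  exact lt_of_lt_of_le h1 (not_lt.mp h2)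

theorem pv_foldl_ins_pairwise (xs : List (String × Int)) :
    (xs.foldl (fun acc x =>
        PySem.List.insertBy (fun a b => decide (hand_sort a < hand_sort b)) x acc) []).Pairwise
      (fun a b => decide (hand_sort b < hand_sort a) = false) := by
  induction xs using List.reverseRecOn with
  | nil => simp
  | append_singleton t x ih =>
    rw [List.foldl_append]
    simp only [List.foldl_cons, List.foldl_nil]
    exact pv_pairwise_insertBy _ x (fun a b => pv_hasym a b)
      (fun a b c h1 h2 => pv_htr a b c h1 h2) _ ih

-- filtering commutes with the stable sort by hand_sort
theorem pv_filter_sorted (p : (String × Int) → Bool) (xs : List (String × Int)) :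
    (PySem.List.sorted xs hand_sort).filter p = PySem.List.sorted (xs.filter p) hand_sort := by
  rw [PySem.List.sorted_eq_foldl_insertBy, PySem.List.sorted_eq_foldl_insertBy]
  induction xs using List.reverseRecOn with
  | nil => rfl
  | append_singleton t x ih =>
    rw [List.foldl_append, List.filter_append]
    simp only [List.foldl_cons, List.foldl_nil]
    by_cases hp : p x = true
    · rw [List.filter_cons_of_pos hp]
      simp only [List.filter_nil]
      rw [List.foldl_append]
      simp only [List.foldl_cons, List.foldl_nil]
      rw [pv_filter_insertBy_true _ p x hp (fun y z h1 h2 => pv_hstep y z h1 h2) _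
            (pv_foldl_ins_pairwise t), ih]
    · rw [List.filter_cons_of_neg (by simpa using hp)]
      simp only [List.filter_nil, List.append_nil]
      rw [pv_filter_insertBy_false _ p x (by simpa using hp), ih]

-- the initial bucket dict maps everything to []
theorem pv_d0_getD (c : String) :
    (PySem.Dict.mk [("Five of a kind", ([] : List (String × Int))), ("Four of a kind", []),
      ("Full house", []), ("Three of a kind", []), ("Two pair", []), ("One pair", []),
      ("High card", [])]).getD c [] = [] := by
  simp only [PySem.Dict.getD, PySem.Dict.get?_mk_cons]
  split_ifs <;> rfl

-- A's bucket-filling loop computes, per category, exactly a filter of data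
theorem pv_d1_getD (data : List (String × Int)) (c : String) :
    (data.foldl (fun d hand => d.modify (pvCategoryA hand) [] (fun hs => hs ++ [hand]))
      (PySem.Dict.mk [("Five of a kind", []), ("Four of a kind", []), ("Full house", []),
        ("Three of a kind", []), ("Two pair", []), ("One pair", []), ("High card", [])])).getD c []
    = data.filter (fun h => pvCategoryA h == c) := by
  have hmap : ((data.map (fun h : String × Int => (pvCategoryA h, h))).foldl
        (fun (d : PySem.Dict String (List (String × Int))) p => d.modify p.1 [] (fun hs => hs ++ [p.2]))
        (PySem.Dict.mk [("Five of a kind", []), ("Four of a kind", []), ("Full house", []),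
          ("Three of a kind", []), ("Two pair", []), ("One pair", []), ("High card", [])]))
      = data.foldl (fun d hand => d.modify (pvCategoryA hand) [] (fun hs => hs ++ [hand]))
        (PySem.Dict.mk [("Five of a kind", []), ("Four of a kind", []), ("Full house", []),
          ("Three of a kind", []), ("Two pair", []), ("One pair", []), ("High card", [])]) := by
    rw [List.foldl_map]
  rw [← hmap, PySem.Dict.getD_foldl_modify_append, pv_d0_getD]
  simp [List.filter_map, Function.comp_def, List.map_map]

theorem pv_d1_keys (data : List (String × Int)) :
    (data.foldl (fun d hand => d.modify (pvCategoryA hand) [] (fun hs => hs ++ [hand]))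
      (PySem.Dict.mk [("Five of a kind", []), ("Four of a kind", []), ("Full house", []),
        ("Three of a kind", []), ("Two pair", []), ("One pair", []), ("High card", [])])).keys
    = pvCategories := by
  rw [PySem.Dict.keys_foldl_modify_key data pvCategoryA [] (fun _ hand => fun hs => hs ++ [hand])]
  rw [PySem.Dict.keys_mk]
  have : (List.map (fun x => x.1)
      [("Five of a kind", ([] : List (String × Int))), ("Four of a kind", []), ("Full house", []),
       ("Three of a kind", []), ("Two pair", []), ("One pair", []), ("High card", [])])
      = pvCategories := by simp [pvCategories]
  rw [this]
  exact pv_update_self _ _ (by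
    intro x hx
    rcases List.mem_map.mp hx with ⟨h, _, rfl⟩
    exact pv_catA_mem h)

theorem pv_d1_items (data : List (String × Int)) :
    (data.foldl (fun d hand => d.modify (pvCategoryA hand) [] (fun hs => hs ++ [hand]))
      (PySem.Dict.mk [("Five of a kind", []), ("Four of a kind", []), ("Full house", []),
        ("Three of a kind", []), ("Two pair", []), ("One pair", []), ("High card", [])])).items
    = pvCategories.map (fun c => (c, data.filter (fun h => pvCategoryA h == c))) := by
  have hk := pv_d1_keys data
  have hnd : (data.foldl (fun d hand => d.modify (pvCategoryA hand) [] (fun hs => hs ++ [hand]))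
      (PySem.Dict.mk [("Five of a kind", []), ("Four of a kind", []), ("Full house", []),
        ("Three of a kind", []), ("Two pair", []), ("One pair", []), ("High card", [])])).keys.Nodup := by
    rw [hk]; decide
  rw [PySem.Dict.items_eq_map_keys _ hnd [], hk]
  exact List.map_congr_left (fun c _ => by rw [pv_d1_getD])

-- A's whole result: each bucket is the sorted filter of data
theorem pv_A_eq (data : List (String × Int)) :
    categorise_and_sort data
    = pvCategories.map (fun c =>
        (c, PySem.List.sorted (data.filter (fun h => pvCategoryA h == c)) hand_sort)) := by
  simp only [categorise_and_sort]
  rw [pv_d1_items]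
  have hmap : ((pvCategories.map (fun c : String => (c, data.filter (fun h => pvCategoryA h == c)))).foldl
        (fun (d : PySem.Dict String (List (String × Int))) (p : String × List (String × Int)) =>
          d.insert p.1 (PySem.List.sorted p.2 hand_sort))
        (data.foldl (fun d hand => d.modify (pvCategoryA hand) [] (fun hs => hs ++ [hand]))
          (PySem.Dict.mk [("Five of a kind", []), ("Four of a kind", []), ("Full house", []),
            ("Three of a kind", []), ("Two pair", []), ("One pair", []), ("High card", [])])))
      = pvCategories.foldl (fun d c =>
          d.insert c (PySem.List.sorted (data.filter (fun h => pvCategoryA h == c)) hand_sort))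
        (data.foldl (fun d hand => d.modify (pvCategoryA hand) [] (fun hs => hs ++ [hand]))
          (PySem.Dict.mk [("Five of a kind", []), ("Four of a kind", []), ("Full house", []),
            ("Three of a kind", []), ("Two pair", []), ("One pair", []), ("High card", [])])) := by
    rw [List.foldl_map]
  rw [hmap]
  -- the final reassignment loop: keys unchanged, each value sorted
  have hkeys : (pvCategories.foldl (fun d c =>
      d.insert c (PySem.List.sorted (data.filter (fun h => pvCategoryA h == c)) hand_sort))
      (data.foldl (fun d hand => d.modify (pvCategoryA hand) [] (fun hs => hs ++ [hand]))
        (PySem.Dict.mk [("Five of a kind", []), ("Four of a kind", []), ("Full house", []),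
          ("Three of a kind", []), ("Two pair", []), ("One pair", []), ("High card", [])]))).keys
      = pvCategories := by
    rw [PySem.Dict.keys_foldl_insert_key pvCategories (fun c => c)
      (fun _ c => PySem.List.sorted (data.filter (fun h => pvCategoryA h == c)) hand_sort)]
    rw [pv_d1_keys, List.map_id']
    exact pv_update_self _ _ (fun x hx => hx)
  have hnd : (pvCategories.foldl (fun d c =>
      d.insert c (PySem.List.sorted (data.filter (fun h => pvCategoryA h == c)) hand_sort))
      (data.foldl (fun d hand => d.modify (pvCategoryA hand) [] (fun hs => hs ++ [hand]))
        (PySem.Dict.mk [("Five of a kind", []), ("Four of a kind", []), ("Full house", []),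
          ("Three of a kind", []), ("Two pair", []), ("One pair", []), ("High card", [])]))).keys.Nodup := by
    rw [hkeys]; decide
  rw [PySem.Dict.items_eq_map_keys _ hnd [], hkeys]
  refine List.map_congr_left (fun c hc => ?_)
  have hg : (pvCategories.foldl (fun d c =>
      d.insert c (PySem.List.sorted (data.filter (fun h => pvCategoryA h == c)) hand_sort))
      (data.foldl (fun d hand => d.modify (pvCategoryA hand) [] (fun hs => hs ++ [hand]))
        (PySem.Dict.mk [("Five of a kind", []), ("Four of a kind", []), ("Full house", []),
          ("Three of a kind", []), ("Two pair", []), ("One pair", []), ("High card", [])]))).get? c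
      = some (PySem.List.sorted (data.filter (fun h => pvCategoryA h == c)) hand_sort) :=
    pv_get?_foldl_insert pvCategories
      (fun c => PySem.List.sorted (data.filter (fun h => pvCategoryA h == c)) hand_sort)
      _ c (by decide) hc
  simp [PySem.Dict.getD, hg]

-- ===== VERDICT (by name: the statement is the Claim_ definition above) =====
theorem categorise_and_sort_spec : Claim_equal_categorise_and_sort := by
  intro data _ _
  unfold Spec_categorise_and_sort
  rw [pv_A_eq]
  simp only [categorise_and_sort_alt]
  refine List.map_congr_left (fun c _ => ?_)
  have hfc : (PySem.List.sorted data hand_sort).filter (fun h => pvClassify h == c)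
      = (PySem.List.sorted data hand_sort).filter (fun h => pvCategoryA h == c) :=
    List.filter_congr (fun h _ => by rw [pv_classify_eq])
  rw [hfc, pv_filter_sorted]
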